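-- pv_equiv track=rewrite | github.com/kritishmohapatra/GFG_SOLUTIONS | Difficulty: Medium/Count X in Range of a Sorted Array/count-x-in-range-of-a-sorted-array.py | countXInRange
-- ===== SOURCE A (Python) =====
-- def countXInRange(arr, queries):
--     # code here
--     from bisect import bisect_left, bisect_right
--     answers = []
--     for l, r, x in queries:
--         i = bisect_left(arr, x, lo=l, hi=r + 1)
--         if i <= r and arr[i] == x:
--             answers.append(bisect_right(arr, x, lo=i + 1, hi=r + 1) - i)
--         else:
--             answers.append(0)
--     return answers
-- ===== SOURCE B (Python) =====
-- def countXInRange(arr, queries):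
--     # One-time value -> sorted-positions index, then count positions inside [l, r].
--     pos = {}
--     for j, v in enumerate(arr):
--         pos[v] = pos.get(v, []) + [j]
--     return [sum(1 for j in pos.get(x, []) if l <= j <= r) for l, r, x in queries]
-- ===== Notes on version B (the rewrite author's own statement) =====
-- stated objective: alternative
-- what changed: Replaces per-query binary search over arr (bisect_left/bisect_right with lo/hi) by a one-pass value-to-positions index built once, with each query answered by counting that value's positions inside [l, r]; Pre_ restricts to the task's natural domain: per query 0 <= l, r < len(arr) unless the range [l, r] is empty, and the queried window arr[l..r] sorted unless x is absent from arr (out-of-range bounds make A raise ValueError/IndexError on most inputs, and on an unsorted window A's bisect result is meaningless).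
-- outside the precondition, e.g. on countXInRange([2, 1, 3], [(0, 2, 1)]): A returns [0], B returns [1]; on countXInRange([1, 2, 3], [(0, 3, 0)]): A returns [0], B returns [0]; on countXInRange([1, 2, 3], [(0, 3, 2)]): A raises IndexError, B returns [1]
import Mathlib
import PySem

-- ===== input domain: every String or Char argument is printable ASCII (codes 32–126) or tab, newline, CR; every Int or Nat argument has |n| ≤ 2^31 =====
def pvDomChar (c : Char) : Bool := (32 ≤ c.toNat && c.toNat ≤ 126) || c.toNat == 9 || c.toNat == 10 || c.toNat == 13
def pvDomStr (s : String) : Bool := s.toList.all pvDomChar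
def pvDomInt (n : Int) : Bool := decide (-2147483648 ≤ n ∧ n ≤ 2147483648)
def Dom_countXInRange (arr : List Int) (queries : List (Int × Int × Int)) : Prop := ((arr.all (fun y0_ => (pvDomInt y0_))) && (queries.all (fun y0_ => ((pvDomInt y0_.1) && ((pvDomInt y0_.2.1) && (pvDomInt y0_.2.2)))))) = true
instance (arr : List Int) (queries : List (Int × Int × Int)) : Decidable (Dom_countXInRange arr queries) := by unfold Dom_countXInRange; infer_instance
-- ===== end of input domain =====

-- B replaces A's per-query binary search over arr by a one-time value→positions index,
-- each query counting that value's positions inside [l, r] (an alternative algorithm, not claimed faster).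


-- ===== PORT A =====
-- bisect.bisect_left(arr, x, lo, hi): exact port of CPython's loop.  arr[mid] is ported as
-- pyGetD (mid is in range on every input Pre_ admits; Python's ValueError on lo<0 and
-- IndexError on mid ≥ len(arr) are exactly the inputs Pre_ excludes).
def pvBisectLeft (arr : List Int) (x lo hi : Int) : Int :=
  if h : lo < hi then
    if PySem.List.pyGetD arr (PySem.Int.floordiv (lo + hi) 2) 0 < x then
      pvBisectLeft arr x (PySem.Int.floordiv (lo + hi) 2 + 1) hi
    else
      pvBisectLeft arr x lo (PySem.Int.floordiv (lo + hi) 2)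
  else lo
termination_by (hi - lo).toNat
decreasing_by
  · have hb := PySem.Int.floordiv_two_mid_bounds (lo := lo) (hi := hi) (le_of_lt h)
    omega
  · have hb := PySem.Int.floordiv_two_mid_bounds (lo := lo) (hi := hi) (le_of_lt h)
    have hlt : PySem.Int.floordiv (lo + hi) 2 < hi :=
      (PySem.Int.floordiv_lt_iff_lt_mul (by norm_num)).2 (by omega)
    omega

-- bisect.bisect_right(arr, x, lo, hi), same conventions as pvBisectLeft.
def pvBisectRight (arr : List Int) (x lo hi : Int) : Int :=
  if h : lo < hi then
    if x < PySem.List.pyGetD arr (PySem.Int.floordiv (lo + hi) 2) 0 then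
      pvBisectRight arr x lo (PySem.Int.floordiv (lo + hi) 2)
    else
      pvBisectRight arr x (PySem.Int.floordiv (lo + hi) 2 + 1) hi
  else lo
termination_by (hi - lo).toNat
decreasing_by
  · have hb := PySem.Int.floordiv_two_mid_bounds (lo := lo) (hi := hi) (le_of_lt h)
    have hlt : PySem.Int.floordiv (lo + hi) 2 < hi :=
      (PySem.Int.floordiv_lt_iff_lt_mul (by norm_num)).2 (by omega)
    omega
  · have hb := PySem.Int.floordiv_two_mid_bounds (lo := lo) (hi := hi) (le_of_lt h)
    omega

def countXInRange (arr : List Int) (queries : List (Int × Int × Int)) : List Int :=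
  queries.foldl (fun answers q =>
    let i := pvBisectLeft arr q.2.2 q.1 (q.2.1 + 1)
    if i ≤ q.2.1 ∧ PySem.List.pyGetD arr i 0 = q.2.2 then
      answers ++ [pvBisectRight arr q.2.2 (i + 1) (q.2.1 + 1) - i]
    else
      answers ++ [0]) []

-- ===== PORT B =====
-- pos[v] = pos.get(v, []) + [j]  over enumerate(arr)
def pvBuildPos (arr : List Int) : PySem.Dict Int (List Int) :=
  (PySem.List.enumerate arr).foldl (fun d p => d.modify p.2 [] (fun ps => ps ++ [p.1])) PySem.Dict.empty

def countXInRange_alt (arr : List Int) (queries : List (Int × Int × Int)) : List Int :=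
  let pos := pvBuildPos arr
  queries.map (fun q =>
    ((pos.getD q.2.2 []).foldl (fun acc j => if q.1 ≤ j ∧ j ≤ q.2.1 then acc + 1 else acc) 0))

-- ===== PRECONDITION & SPEC =====
-- Pre_ is the task's natural domain ("count x in a RANGE of a SORTED array"), per query:
-- 0 ≤ l, and r < len(arr) unless the range [l, r] is empty (l < 0 raises ValueError in A;
-- r ≥ len(arr) with a non-empty range makes A's bisect raise IndexError on most inputs),
-- and the queried window arr[l..r] — the only part of arr that A's bisect reads — must be
-- sorted (adjacent pairs nondecreasing), unless x ∉ arr (then no query can match anything):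
-- on an unsorted window A's bisect result is meaningless and B need not match it.
def Pre_countXInRange (arr : List Int) (queries : List (Int × Int × Int)) : Prop :=
  ∀ q ∈ queries, 0 ≤ q.1 ∧ (q.2.1 < (arr.length : Int) ∨ q.2.1 + 1 ≤ q.1) ∧
    ((∀ j ∈ List.range arr.length, q.1 ≤ (j : Int) → (j : Int) < q.2.1 →
        PySem.List.pyGetD arr (j : Int) 0 ≤ PySem.List.pyGetD arr ((j : Int) + 1) 0) ∨
      q.2.2 ∉ arr)
instance (arr : List Int) (queries : List (Int × Int × Int)) : Decidable (Pre_countXInRange arr queries) := by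
  unfold Pre_countXInRange; infer_instance

def pvWitness_countXInRange : List Int × (List (Int × Int × Int)) :=
  ([1, 2, 2, 5], [(0, 3, 2), (1, 2, 5), (5, 0, 1)])

def Spec_countXInRange (arr : List Int) (queries : List (Int × Int × Int)) (out : List Int) : Prop := out = countXInRange_alt arr queries
instance (arr : List Int) (queries : List (Int × Int × Int)) (out : List Int) : Decidable (Spec_countXInRange arr queries out) := by unfold Spec_countXInRange; infer_instance

-- ===== CLAIM (what is proved, stated in full; the proofs are below) =====
def Claim_equal_countXInRange : Prop := ∀ (arr : List Int) (queries : List (Int × Int × Int)), Dom_countXInRange arr queries → Pre_countXInRange arr queries → Spec_countXInRange arr queries (countXInRange arr queries)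

-- ===== LEMMAS AND PROOFS =====

-- a window whose adjacent pairs are nondecreasing is monotone
lemma pv_win_mono (arr : List Int) (l r : Int) (hr : r < (arr.length : Int))
    (hadj : ∀ j ∈ List.range arr.length, l ≤ (j : Int) → (j : Int) < r →
      PySem.List.pyGetD arr (j : Int) 0 ≤ PySem.List.pyGetD arr ((j : Int) + 1) 0) :
    ∀ a b : Int, 0 ≤ a → l ≤ a → a ≤ b → b ≤ r →
      PySem.List.pyGetD arr a 0 ≤ PySem.List.pyGetD arr b 0 := by
  intro a b ha hla hab
  induction b, hab using Int.le_induction with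
  | base => intro _; exact le_refl _
  | succ b hb ih =>
    intro hbr
    have h1 := ih (by omega)
    have h2 := hadj b.toNat (List.mem_range.2 (by omega)) (by omega) (by omega)
    rw [Int.toNat_of_nonneg (by omega)] at h2
    omega

-- characterisation of A's bisect_left on a sorted list
lemma pv_bl_spec (arr : List Int) (x : Int) (L H : Int)
    (hmono : ∀ a b : Int, 0 ≤ a → L ≤ a → a ≤ b → b < H →
      PySem.List.pyGetD arr a 0 ≤ PySem.List.pyGetD arr b 0) (lo hi : Int) :
    L ≤ lo → hi ≤ H → 0 ≤ lo → hi ≤ (arr.length : Int) → lo ≤ hi →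
      lo ≤ pvBisectLeft arr x lo hi ∧ pvBisectLeft arr x lo hi ≤ hi ∧
      (∀ j, lo ≤ j → j < pvBisectLeft arr x lo hi → PySem.List.pyGetD arr j 0 < x) ∧
      (∀ j, pvBisectLeft arr x lo hi ≤ j → j < hi → x ≤ PySem.List.pyGetD arr j 0) := by
  fun_induction pvBisectLeft arr x lo hi with
  | case1 lo hi h hv ih =>
    intro hL hH hlo hhi _
    have hb := PySem.Int.floordiv_two_mid_bounds (lo := lo) (hi := hi) (le_of_lt h)
    have hlt : PySem.Int.floordiv (lo + hi) 2 < hi :=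
      (PySem.Int.floordiv_lt_iff_lt_mul (by norm_num)).2 (by omega)
    obtain ⟨h1, h2, h3, h4⟩ := ih (by omega) hH (by omega) hhi (by omega)
    refine ⟨by omega, h2, ?_, h4⟩
    intro j hj1 hj2
    by_cases hcase : PySem.Int.floordiv (lo + hi) 2 + 1 ≤ j
    · exact h3 j hcase hj2
    · calc PySem.List.pyGetD arr j 0 ≤ PySem.List.pyGetD arr (PySem.Int.floordiv (lo + hi) 2) 0 :=
            hmono j _ (by omega) (by omega) (by omega) (by omega)
        _ < x := hv
  | case2 lo hi h hv ih =>
    intro hL hH hlo hhi _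
    have hb := PySem.Int.floordiv_two_mid_bounds (lo := lo) (hi := hi) (le_of_lt h)
    have hlt : PySem.Int.floordiv (lo + hi) 2 < hi :=
      (PySem.Int.floordiv_lt_iff_lt_mul (by norm_num)).2 (by omega)
    obtain ⟨h1, h2, h3, h4⟩ := ih hL (by omega) hlo (by omega) (by omega)
    refine ⟨h1, by omega, h3, ?_⟩
    intro j hj1 hj2
    by_cases hcase : j < PySem.Int.floordiv (lo + hi) 2
    · exact h4 j hj1 hcase
    · calc x ≤ PySem.List.pyGetD arr (PySem.Int.floordiv (lo + hi) 2) 0 := not_lt.1 hv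
        _ ≤ PySem.List.pyGetD arr j 0 := hmono _ j (by omega) (by omega) (by omega) (by omega)
  | case3 lo hi h =>
    intro _ _ _ _ hle
    exact ⟨le_refl _, hle, fun j hj1 hj2 => absurd (lt_of_le_of_lt hj1 hj2) (lt_irrefl _),
           fun j hj1 hj2 => absurd h (by omega)⟩

-- characterisation of A's bisect_right on a sorted list
lemma pv_br_spec (arr : List Int) (x : Int) (L H : Int)
    (hmono : ∀ a b : Int, 0 ≤ a → L ≤ a → a ≤ b → b < H →
      PySem.List.pyGetD arr a 0 ≤ PySem.List.pyGetD arr b 0) (lo hi : Int) :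
    L ≤ lo → hi ≤ H → 0 ≤ lo → hi ≤ (arr.length : Int) → lo ≤ hi →
      lo ≤ pvBisectRight arr x lo hi ∧ pvBisectRight arr x lo hi ≤ hi ∧
      (∀ j, lo ≤ j → j < pvBisectRight arr x lo hi → PySem.List.pyGetD arr j 0 ≤ x) ∧
      (∀ j, pvBisectRight arr x lo hi ≤ j → j < hi → x < PySem.List.pyGetD arr j 0) := by
  fun_induction pvBisectRight arr x lo hi with
  | case1 lo hi h hv ih =>
    intro hL hH hlo hhi _
    have hb := PySem.Int.floordiv_two_mid_bounds (lo := lo) (hi := hi) (le_of_lt h)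
    have hlt : PySem.Int.floordiv (lo + hi) 2 < hi :=
      (PySem.Int.floordiv_lt_iff_lt_mul (by norm_num)).2 (by omega)
    obtain ⟨h1, h2, h3, h4⟩ := ih hL (by omega) hlo (by omega) (by omega)
    refine ⟨h1, by omega, h3, ?_⟩
    intro j hj1 hj2
    by_cases hcase : j < PySem.Int.floordiv (lo + hi) 2
    · exact h4 j hj1 hcase
    · calc x < PySem.List.pyGetD arr (PySem.Int.floordiv (lo + hi) 2) 0 := hv
        _ ≤ PySem.List.pyGetD arr j 0 := hmono _ j (by omega) (by omega) (by omega) (by omega)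
  | case2 lo hi h hv ih =>
    intro hL hH hlo hhi _
    have hb := PySem.Int.floordiv_two_mid_bounds (lo := lo) (hi := hi) (le_of_lt h)
    have hlt : PySem.Int.floordiv (lo + hi) 2 < hi :=
      (PySem.Int.floordiv_lt_iff_lt_mul (by norm_num)).2 (by omega)
    obtain ⟨h1, h2, h3, h4⟩ := ih (by omega) hH (by omega) hhi (by omega)
    refine ⟨by omega, h2, ?_, h4⟩
    intro j hj1 hj2
    by_cases hcase : PySem.Int.floordiv (lo + hi) 2 + 1 ≤ j
    · exact h3 j hcase hj2
    · calc PySem.List.pyGetD arr j 0 ≤ PySem.List.pyGetD arr (PySem.Int.floordiv (lo + hi) 2) 0 :=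
            hmono j _ (by omega) (by omega) (by omega) (by omega)
        _ ≤ x := not_lt.1 hv
  | case3 lo hi h =>
    intro _ _ _ _ hle
    exact ⟨le_refl _, hle, fun j hj1 hj2 => absurd (lt_of_le_of_lt hj1 hj2) (lt_irrefl _),
           fun j hj1 hj2 => absurd h (by omega)⟩

-- B's index: unfolding the dict-building fold
lemma pv_foldl_modify_getD (ps : List (Int × Int)) (d : PySem.Dict Int (List Int)) (x : Int) :
    (ps.foldl (fun d p => d.modify p.2 [] (fun l => l ++ [p.1])) d).getD x []
      = d.getD x [] ++ (ps.filter (fun p => p.2 == x)).map (·.1) := by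
  induction ps generalizing d with
  | nil => simp
  | cons p ps ih =>
    rw [List.foldl_cons, ih]
    by_cases h : p.2 = x
    · simp [h]
    · simp [h, PySem.Dict.getD_modify, Ne.symm h]

-- the positions list B stores for x
lemma pv_pos_getD (arr : List Int) (x : Int) :
    (pvBuildPos arr).getD x []
      = (PySem.List.pyRange 0 (arr.length : Int) 1).filter (fun j => PySem.List.pyGetD arr j 0 == x) := by
  rw [pvBuildPos, pv_foldl_modify_getD]
  rw [PySem.List.enumerate_eq_map_pyRange arr 0, List.filter_map, List.map_map]
  simp [Function.comp_def, PySem.List.len]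

-- counting an interval inside range(0, N)
lemma pv_countP_interval : ∀ (N : Int), 0 ≤ N → ∀ i k : Int, 0 ≤ i → i ≤ k → k ≤ N →
    ((PySem.List.pyRange 0 N 1).countP (fun j => decide (i ≤ j ∧ j < k)) : Int) = k - i := by
  intro N hN
  induction N, hN using Int.le_induction with
  | base =>
    intro i k h0 hik hk
    have h1 : i = 0 := by omega
    have h2 : k = 0 := by omega
    subst h1; subst h2
    simp [PySem.List.pyRange]
  | succ n hn ih =>
    intro i k h0 hik hk
    by_cases hik' : i = k
    · subst hik'
      rw [List.countP_eq_zero.2 (by intro a _; simp only [decide_eq_true_eq]; omega)]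
      push_cast; omega
    · rw [PySem.List.pyRange_one_succ_right hn, List.countP_append]
      simp only [List.countP_cons, List.countP_nil]
      by_cases hkn : k ≤ n
      · have hih := ih i k h0 hik hkn
        have hfalse : (decide (i ≤ n ∧ n < k)) = false := by
          simp only [decide_eq_false_iff_not]; omega
        rw [hfalse]
        push_cast
        omega
      · have hkn1 : k = n + 1 := by omega
        have hih := ih i n h0 (by omega) (le_refl n)
        have hcong : List.countP (fun j => decide (i ≤ j ∧ j < k)) (PySem.List.pyRange 0 n)
            = List.countP (fun j => decide (i ≤ j ∧ j < n)) (PySem.List.pyRange 0 n) := by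
          apply List.countP_congr
          intro a ha
          have hm := PySem.List.mem_pyRange_one.1 ha
          simp only [decide_eq_true_eq]
          omega
        have htrue : (decide (i ≤ n ∧ n < k)) = true := by simp only [decide_eq_true_eq]; omega
        rw [hcong, htrue]
        push_cast
        push_cast at hih
        simp only [if_true]
        omega

-- B's per-query loop is a countP over the positions list
lemma pv_b_query (arr : List Int) (l r x : Int) :
    ((pvBuildPos arr).getD x []).foldl (fun acc j => if l ≤ j ∧ j ≤ r then acc + 1 else acc) 0
      = ((PySem.List.pyRange 0 (arr.length : Int) 1).countP
          (fun j => decide (l ≤ j ∧ j ≤ r) && (PySem.List.pyGetD arr j 0 == x)) : Int) := by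
  have hfn : (fun (acc : Int) (j : Int) => if l ≤ j ∧ j ≤ r then acc + 1 else acc)
      = (fun acc j => if (fun j => decide (l ≤ j ∧ j ≤ r)) j = true then acc + 1 else acc) := by
    funext acc j
    by_cases h : l ≤ j ∧ j ≤ r <;> simp [h]
  rw [hfn, PySem.List.foldl_count_if, pv_pos_getD, List.countP_filter]
  simp

-- bisect_left stays inside [lo, hi] on any list (no sortedness needed)
lemma pv_bl_bounds (arr : List Int) (x : Int) (lo hi : Int) : lo ≤ hi →
    lo ≤ pvBisectLeft arr x lo hi ∧ pvBisectLeft arr x lo hi ≤ hi := by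
  fun_induction pvBisectLeft arr x lo hi with
  | case1 lo hi h hv ih =>
    intro _
    have hb := PySem.Int.floordiv_two_mid_bounds (lo := lo) (hi := hi) (le_of_lt h)
    have hlt : PySem.Int.floordiv (lo + hi) 2 < hi :=
      (PySem.Int.floordiv_lt_iff_lt_mul (by norm_num)).2 (by omega)
    have := ih (by omega)
    omega
  | case2 lo hi h hv ih =>
    intro _
    have hb := PySem.Int.floordiv_two_mid_bounds (lo := lo) (hi := hi) (le_of_lt h)
    have hlt : PySem.Int.floordiv (lo + hi) 2 < hi :=
      (PySem.Int.floordiv_lt_iff_lt_mul (by norm_num)).2 (by omega)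
    have := ih (by omega)
    omega
  | case3 lo hi h => intro hle; exact ⟨le_refl _, hle⟩

-- a query with an empty range [l, r] (r < l): A's bisect never loops, both sides give 0
lemma pv_query_degenerate (arr : List Int) (l r x : Int) (hdeg : r + 1 ≤ l) :
    (if pvBisectLeft arr x l (r + 1) ≤ r ∧ PySem.List.pyGetD arr (pvBisectLeft arr x l (r + 1)) 0 = x then
        pvBisectRight arr x (pvBisectLeft arr x l (r + 1) + 1) (r + 1) - pvBisectLeft arr x l (r + 1)
      else (0 : Int))
    = ((pvBuildPos arr).getD x []).foldl (fun acc j => if l ≤ j ∧ j ≤ r then acc + 1 else acc) 0 := by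
  rw [pv_b_query]
  have hi : pvBisectLeft arr x l (r + 1) = l := by
    rw [pvBisectLeft]
    simp [show ¬(l < r + 1) by omega]
  rw [List.countP_eq_zero.2 (by
    intro a _
    simp only [Bool.and_eq_true, decide_eq_true_eq, beq_iff_eq, not_and]
    intro h1 _
    omega)]
  rw [hi, if_neg (by omega)]
  rfl

-- a query for a value not in arr: A's arr[i] == x test fails, both sides give 0 (any arr)
lemma pv_query_notmem (arr : List Int) (l r x : Int)
    (hl : 0 ≤ l) (hr : r < (arr.length : Int)) (hx : x ∉ arr) :
    (if pvBisectLeft arr x l (r + 1) ≤ r ∧ PySem.List.pyGetD arr (pvBisectLeft arr x l (r + 1)) 0 = x then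
        pvBisectRight arr x (pvBisectLeft arr x l (r + 1) + 1) (r + 1) - pvBisectLeft arr x l (r + 1)
      else (0 : Int))
    = ((pvBuildPos arr).getD x []).foldl (fun acc j => if l ≤ j ∧ j ≤ r then acc + 1 else acc) 0 := by
  by_cases hdeg : r + 1 ≤ l
  · exact pv_query_degenerate arr l r x hdeg
  · rw [pv_b_query]
    have hib := pv_bl_bounds arr x l (r + 1) (by omega)
    rw [if_neg (by
      rintro ⟨hc1, hc2⟩
      apply hx
      rw [PySem.List.pyGetD_eq_getElem arr 0 (by omega) (by omega)] at hc2
      exact hc2 ▸ List.getElem_mem _)]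
    rw [List.countP_eq_zero.2 (by
      intro a ha
      have hm := PySem.List.mem_pyRange_one.1 ha
      simp only [Bool.and_eq_true, decide_eq_true_eq, beq_iff_eq, not_and]
      intro _ hc
      apply hx
      rw [PySem.List.pyGetD_eq_getElem arr 0 (by omega) (by omega)] at hc
      exact hc ▸ List.getElem_mem _)]
    rfl

-- the per-query value of A equals the per-query value of B
lemma pv_query_eq (arr : List Int) (l r x : Int)
    (hl : 0 ≤ l) (hr : r < (arr.length : Int))
    (hadj : ∀ j ∈ List.range arr.length, l ≤ (j : Int) → (j : Int) < r →
      PySem.List.pyGetD arr (j : Int) 0 ≤ PySem.List.pyGetD arr ((j : Int) + 1) 0) :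
    (if pvBisectLeft arr x l (r + 1) ≤ r ∧ PySem.List.pyGetD arr (pvBisectLeft arr x l (r + 1)) 0 = x then
        pvBisectRight arr x (pvBisectLeft arr x l (r + 1) + 1) (r + 1) - pvBisectLeft arr x l (r + 1)
      else (0 : Int))
    = ((pvBuildPos arr).getD x []).foldl (fun acc j => if l ≤ j ∧ j ≤ r then acc + 1 else acc) 0 := by
  rw [pv_b_query]
  by_cases hlr : r < l
  · -- empty query range: bisect_left never loops and returns l, A appends 0; B counts nothing
    have hi : pvBisectLeft arr x l (r + 1) = l := by
      rw [pvBisectLeft]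
      simp [show ¬(l < r + 1) by omega]
    rw [List.countP_eq_zero.2 (by
      intro a _
      simp only [Bool.and_eq_true, decide_eq_true_eq, beq_iff_eq, not_and]
      intro h1 _
      omega)]
    rw [hi, if_neg (by omega)]
    rfl
  · have hlr' : l ≤ r := not_lt.1 hlr
    have hmono : ∀ a b : Int, 0 ≤ a → l ≤ a → a ≤ b → b < r + 1 →
        PySem.List.pyGetD arr a 0 ≤ PySem.List.pyGetD arr b 0 := by
      intro a b ha hla hab hb
      exact pv_win_mono arr l r hr hadj a b ha hla hab (by omega)
    obtain ⟨hi1, hi2, hi3, hi4⟩ :=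
      pv_bl_spec arr x l (r + 1) hmono l (r + 1) (le_refl l) (le_refl _) hl (by omega) (by omega)
    set i := pvBisectLeft arr x l (r + 1) with hidef
    by_cases hcond : i ≤ r ∧ PySem.List.pyGetD arr i 0 = x
    · obtain ⟨hk1, hk2, hk3, hk4⟩ :=
        pv_br_spec arr x l (r + 1) hmono (i + 1) (r + 1) (by omega) (le_refl _) (by omega) (by omega) (by omega)
      set k := pvBisectRight arr x (i + 1) (r + 1) with hkdef
      rw [if_pos hcond]
      have hcong : List.countP (fun j => decide (l ≤ j ∧ j ≤ r) && (PySem.List.pyGetD arr j 0 == x))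
            (PySem.List.pyRange 0 (arr.length : Int) 1)
          = List.countP (fun j => decide (i ≤ j ∧ j < k)) (PySem.List.pyRange 0 (arr.length : Int) 1) := by
        apply List.countP_congr
        intro a ha
        have hm := PySem.List.mem_pyRange_one.1 ha
        simp only [Bool.and_eq_true, decide_eq_true_eq, beq_iff_eq]
        constructor
        · rintro ⟨⟨ha1, ha2⟩, ha3⟩
          constructor
          · by_contra hc
            exact absurd ha3 (ne_of_lt (hi3 a ha1 (by omega)))
          · by_contra hc
            exact absurd ha3 (ne_of_gt (hk4 a (by omega) (by omega)))
        · rintro ⟨ha1, ha2⟩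
          refine ⟨⟨by omega, by omega⟩, ?_⟩
          rcases eq_or_lt_of_le ha1 with rfl | hgt
          · exact hcond.2
          · have h1 : PySem.List.pyGetD arr a 0 ≤ x := hk3 a (by omega) (by omega)
            have h2 : PySem.List.pyGetD arr i 0 ≤ PySem.List.pyGetD arr a 0 :=
              hmono i a (by omega) (by omega) (by omega) (by omega)
            omega
      rw [hcong]
      exact (pv_countP_interval (arr.length : Int) (by omega) i k (by omega) (by omega) (by omega)).symm
    · rw [if_neg hcond]
      rw [List.countP_eq_zero.2 (by
        intro a ha
        have hm := PySem.List.mem_pyRange_one.1 ha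
        simp only [Bool.and_eq_true, decide_eq_true_eq, beq_iff_eq, not_and]
        rintro ⟨ha1, ha2⟩ ha3
        by_cases hcase : i ≤ r
        · have hne : PySem.List.pyGetD arr i 0 ≠ x := fun h => hcond ⟨hcase, h⟩
          have hxi : x ≤ PySem.List.pyGetD arr i 0 := hi4 i (le_refl i) (by omega)
          by_cases hai : a < i
          · exact absurd ha3 (ne_of_lt (hi3 a ha1 hai))
          · have := hmono i a (by omega) (by omega) (by omega) (by omega)
            omega
        · exact absurd ha3 (ne_of_lt (hi3 a ha1 (by omega))))]
      rfl

-- ===== VERDICT (by name: the statement is the Claim_ definition above) =====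
theorem countXInRange_spec : Claim_equal_countXInRange := by
  intro arr queries _hdom hpre
  clear _hdom
  unfold Spec_countXInRange countXInRange countXInRange_alt
  induction queries using List.reverseRecOn with
  | nil => rfl
  | append_singleton qs q ih =>
    rw [List.foldl_append, List.map_append,
        ih (fun q hq' => hpre q (List.mem_append_left _ hq'))]
    have hq' := hpre q (List.mem_append_right _ (List.mem_singleton_self q))
    obtain ⟨h0, hbound, halt⟩ := hq'
    simp only [List.foldl_cons, List.foldl_nil, List.map_cons, List.map_nil]
    have hv : (if pvBisectLeft arr q.2.2 q.1 (q.2.1 + 1) ≤ q.2.1 ∧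
          PySem.List.pyGetD arr (pvBisectLeft arr q.2.2 q.1 (q.2.1 + 1)) 0 = q.2.2 then
        pvBisectRight arr q.2.2 (pvBisectLeft arr q.2.2 q.1 (q.2.1 + 1) + 1) (q.2.1 + 1) -
          pvBisectLeft arr q.2.2 q.1 (q.2.1 + 1)
      else (0 : Int))
      = ((pvBuildPos arr).getD q.2.2 []).foldl
          (fun acc j => if q.1 ≤ j ∧ j ≤ q.2.1 then acc + 1 else acc) 0 := by
      by_cases hdeg : q.2.1 + 1 ≤ q.1
      · exact pv_query_degenerate arr q.1 q.2.1 q.2.2 hdeg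
      · have hr : q.2.1 < (arr.length : Int) := by omega
        rcases halt with hadj | hx
        · exact pv_query_eq arr q.1 q.2.1 q.2.2 h0 hr hadj
        · exact pv_query_notmem arr q.1 q.2.1 q.2.2 h0 hr hx
    split
    · next hcond => rw [if_pos hcond] at hv; rw [hv]
    · next hcond => rw [if_neg hcond] at hv; rw [← hv]
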